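-- pv_equiv track=rewrite | github.com/broepke/GTx | part_3/4.5.12_stars.py | stars
-- ===== SOURCE A (Python) =====
-- def stars(movies, tvshows):
--     combined = {}
--     appeared_in = []
--
--     for movie in movies:
--         for actor in movies[movie]:
--             if actor in combined.keys():
--                 combined[actor].append(movie)
--                 combined[actor].sort()
--             else:
--                 combined[actor] = [movie]
--
--     for show in tvshows:
--         for actor in tvshows[show]:
--             if actor in combined.keys():
--                 combined[actor].append(show)
--                 combined[actor].sort()
--             else:
--                 combined[actor] = [show]
--
--     return combined
-- ===== SOURCE B (Python) =====
-- def stars(movies, tvshows):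
--     pairs = [(actor, title)
--              for title, actors in [*movies.items(), *tvshows.items()]
--              for actor in actors]
--     grouped = {}
--     for actor, title in pairs:
--         grouped.setdefault(actor, []).append(title)
--     return {actor: sorted(titles) for actor, titles in grouped.items()}
-- ===== Notes on version B (the rewrite author's own statement) =====
-- stated objective: faster
-- what changed: Instead of A's nested dict loops that re-sort an actor's whole title list after every single append, B flattens both dicts into one (actor, title) pair list, groups the titles per actor in one pass, and sorts each actor's list exactly once at the end.
import Mathlib
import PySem

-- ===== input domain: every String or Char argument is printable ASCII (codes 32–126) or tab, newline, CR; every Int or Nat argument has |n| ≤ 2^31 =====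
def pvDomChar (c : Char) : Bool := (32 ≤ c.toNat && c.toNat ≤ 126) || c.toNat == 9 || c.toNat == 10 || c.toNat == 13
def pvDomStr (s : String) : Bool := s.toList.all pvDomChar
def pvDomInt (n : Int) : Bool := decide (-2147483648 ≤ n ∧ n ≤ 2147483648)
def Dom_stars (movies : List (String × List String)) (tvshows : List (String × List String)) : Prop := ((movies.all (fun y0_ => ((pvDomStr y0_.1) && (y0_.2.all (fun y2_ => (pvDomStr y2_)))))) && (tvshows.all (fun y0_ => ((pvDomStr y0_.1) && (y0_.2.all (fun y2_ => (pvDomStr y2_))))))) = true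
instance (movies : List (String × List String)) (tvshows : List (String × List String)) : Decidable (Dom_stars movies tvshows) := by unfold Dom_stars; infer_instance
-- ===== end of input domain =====

-- B replaces A's nested dict loops (which re-sort an actor's whole list after every append)
-- by one flat (actor, title) pair list, one grouping pass, and a single final sort per actor.

-- ===== PORT A =====
-- A's if/append-then-sort/else body (identical in both of A's loops); dict values are
-- replaced in place, so append+sort becomes insert of sorted(old ++ [title]).
def starsUpd (d : PySem.Dict String (List String)) (title : String) (actor : String) :
    PySem.Dict String (List String) :=
  if d.contains actor then
    d.insert actor (PySem.List.sorted (d.getD actor [] ++ [title]) (fun y => y) false)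
  else
    d.insert actor [title]

def stars (movies : List (String × List String)) (tvshows : List (String × List String)) : List (String × List String) :=
  let d1 := movies.foldl (fun d p => p.2.foldl (fun d actor => starsUpd d p.1 actor) d) PySem.Dict.empty
  let d2 := tvshows.foldl (fun d p => p.2.foldl (fun d actor => starsUpd d p.1 actor) d) d1
  d2.items

-- ===== PORT B =====
def stars_alt (movies : List (String × List String)) (tvshows : List (String × List String)) : List (String × List String) :=
  let pairs := (movies ++ tvshows).flatMap (fun p => p.2.map (fun actor => (actor, p.1)))
  let grouped := pairs.foldl (fun d q => d.modify q.1 [] (· ++ [q.2])) PySem.Dict.empty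
  grouped.items.map (fun p => (p.1, PySem.List.sorted p.2 (fun y => y) false))

-- ===== PRECONDITION & SPEC =====
def Spec_stars (movies : List (String × List String)) (tvshows : List (String × List String)) (out : List (String × List String)) : Prop := out = stars_alt movies tvshows
instance (movies : List (String × List String)) (tvshows : List (String × List String)) (out : List (String × List String)) : Decidable (Spec_stars movies tvshows out) := by unfold Spec_stars; infer_instance

-- ===== CLAIM (what is proved, stated in full; the proofs are below) =====
def Claim_equal_stars : Prop := ∀ (movies : List (String × List String)) (tvshows : List (String × List String)), Dom_stars movies tvshows → Spec_stars movies tvshows (stars movies tvshows)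

-- ===== LEMMAS AND PROOFS =====

-- sort a value; map it over every value of a dict
def pvSortVal (l : List String) : List String := PySem.List.sorted l (fun y => y) false

def pvSortD (d : PySem.Dict String (List String)) : PySem.Dict String (List String) :=
  ⟨d.items.map (fun p => (p.1, pvSortVal p.2))⟩

theorem pv_contains_sortD (d : PySem.Dict String (List String)) (k : String) :
    (pvSortD d).contains k = d.contains k := by
  simp [pvSortD, PySem.Dict.contains, List.any_map, Function.comp_def]

theorem pv_get?_sortD (d : PySem.Dict String (List String)) (k : String) :
    (pvSortD d).get? k = (d.get? k).map pvSortVal := by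
  simp [pvSortD, PySem.Dict.get?, List.find?_map, Function.comp_def, Option.map_map]

theorem pv_insert_sortD (d : PySem.Dict String (List String)) (k : String) (v : List String) :
    pvSortD (d.insert k v) = (pvSortD d).insert k (pvSortVal v) := by
  unfold PySem.Dict.insert
  rw [pv_contains_sortD]
  by_cases h : d.contains k
  · simp only [h, if_pos]
    unfold pvSortD
    simp only [List.map_map]
    congr 1
    refine List.map_congr_left (fun p _ => ?_)
    by_cases hk : p.1 = k <;> simp [hk]
  · simp [h, pvSortD]

theorem pv_sorted_sorted_append (l : List String) (x : String) :
    PySem.List.sorted (pvSortVal l ++ [x]) (fun y => y) false = pvSortVal (l ++ [x]) := by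
  apply PySem.List.sorted_eq_sorted_of_perm _ _ _ (fun a b h => h)
  exact (PySem.List.sorted_perm l _ _).append_right _

-- one step: A's branch on sortD d equals sortD of B's modify
theorem pv_step (d : PySem.Dict String (List String)) (a t : String) :
    starsUpd (pvSortD d) t a = pvSortD (d.modify a [] (· ++ [t])) := by
  unfold starsUpd PySem.Dict.modify
  rw [pv_contains_sortD, pv_insert_sortD]
  cases h : d.get? a with
  | none =>
    have hc : d.contains a = false := by
      have := PySem.Dict.contains_eq_isSome_get? d a
      simp [this, h]
    simp only [hc, Bool.false_eq_true, if_false, PySem.Dict.getD_eq_get?_getD, h,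
      Option.getD_none, List.nil_append]
    rfl
  | some v =>
    have hc : d.contains a = true := by
      have := PySem.Dict.contains_eq_isSome_get? d a
      simp [this, h]
    simp only [hc, if_pos, PySem.Dict.getD_eq_get?_getD, h, pv_get?_sortD, Option.map_some,
      Option.getD_some]
    rw [pv_sorted_sorted_append]

-- the fold invariant over any pair list
theorem pv_fold (L : List (String × String)) (d : PySem.Dict String (List String)) :
    L.foldl (fun d q => starsUpd d q.2 q.1) (pvSortD d)
      = pvSortD (L.foldl (fun d q => d.modify q.1 [] (· ++ [q.2])) d) := by
  induction L generalizing d with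
  | nil => rfl
  | cons q L ih =>
    simp only [List.foldl_cons]
    rw [pv_step]
    exact ih _

-- A's two nested loops are the fold of starsUpd over the flattened pair list
theorem pv_stars_flat (movies tvshows : List (String × List String)) :
    stars movies tvshows
      = (((movies ++ tvshows).flatMap (fun p => p.2.map (fun actor => (actor, p.1)))).foldl
          (fun d q => starsUpd d q.2 q.1) PySem.Dict.empty).items := by
  unfold stars
  rw [List.foldl_flatMap, List.foldl_append]
  simp only [List.foldl_map]

theorem pv_sortD_empty : pvSortD PySem.Dict.empty = PySem.Dict.empty := rfl

-- ===== VERDICT (by name: the statement is the Claim_ definition above) =====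
theorem stars_spec : Claim_equal_stars := by
  intro movies tvshows _
  unfold Spec_stars stars_alt
  rw [pv_stars_flat, ← pv_sortD_empty, pv_fold]
  rfl
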